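-- pv_equiv track=rewrite | github.com/WS-Network/powerpoint_converter | app.py | convert_number_to_arabic
-- ===== SOURCE A (Python) =====
-- def convert_number_to_arabic(text):
--     """Helper function to convert numbers to Arabic and clean up formatting"""
--     text = text.strip()
--     if text.endswith('.'):
--         text = text[:-1]
--     if text.startswith('.'):
--         text = text[1:]
--
--     arabic_text = ""
--     last_was_digit = False
--
--     for char in text:
--         if char.isdigit():
--             arabic_text += chr(ord('٠') + int(char))
--             last_was_digit = True
--         else:
--             if char == '.' and last_was_digit:
--                 continue
--             arabic_text += char
--             last_was_digit = False
--
--     return arabic_text.strip()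
-- ===== SOURCE B (Python) =====
-- def convert_number_to_arabic(text):
--     """Convert ASCII digits to Arabic-Indic numerals and drop dots that follow a digit."""
--     text = text.strip()
--     if text.endswith('.'):
--         text = text[:-1]
--     if text.startswith('.'):
--         text = text[1:]
--     # pass 1: convert every digit
--     s = ''.join(chr(ord('٠') + int(c)) if c.isdigit() else c for c in text)
--     # pass 2: emit chars, skipping any run of dots right after an Arabic digit
--     out = []
--     i = 0
--     n = len(s)
--     while i < n:
--         out.append(s[i])
--         if '٠' <= s[i] <= '٩':
--             i += 1
--             while i < n and s[i] == '.':
--                 i += 1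
--         else:
--             i += 1
--     return ''.join(out).strip()
-- ===== Notes on version B (the rewrite author's own statement) =====
-- stated objective: alternative
-- what changed: A's single pass with a last_was_digit boolean state machine is replaced by two passes: first map every ASCII digit to its Arabic-Indic numeral, then a scan that, right after emitting an Arabic digit, skips the whole following run of dots.
import Mathlib
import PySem

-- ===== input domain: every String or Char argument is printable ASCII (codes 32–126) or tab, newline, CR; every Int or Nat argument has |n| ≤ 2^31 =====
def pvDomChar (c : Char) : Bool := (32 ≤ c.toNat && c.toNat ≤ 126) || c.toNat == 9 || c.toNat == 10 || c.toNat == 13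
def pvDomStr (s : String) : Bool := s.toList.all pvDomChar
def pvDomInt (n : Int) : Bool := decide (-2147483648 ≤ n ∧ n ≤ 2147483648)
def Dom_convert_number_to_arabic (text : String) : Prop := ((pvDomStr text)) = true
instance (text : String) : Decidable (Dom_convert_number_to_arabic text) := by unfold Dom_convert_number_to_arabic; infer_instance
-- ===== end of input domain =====

-- B replaces A's single-pass boolean state machine by two passes (map all digits, then drop
-- dot-runs right after an Arabic digit); objective: alternative decomposition, same cost.

-- ===== PORT A =====
-- chr(ord('٠') + int(char)) — exact on Dom, where char.isdigit() holds exactly for '0'..'9'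
def pvArab (c : Char) : Char := Char.ofNat (1632 + (c.toNat - 48))

-- A's for-loop: state (arabic_text, last_was_digit)
def pvALoop : List Char → List Char → Bool → List Char
  | [], acc, _ => acc
  | c :: rest, acc, last =>
    if PySem.Chars.isdigit c then pvALoop rest (acc ++ [pvArab c]) true
    else if c = '.' ∧ last then pvALoop rest acc last
    else pvALoop rest (acc ++ [c]) false

def convert_number_to_arabic (text : String) : String :=
  let t0 := PySem.Chars.strip text.toList
  let t1 := if PySem.Chars.endswith t0 ['.'] then PySem.List.slice t0 none (some (-1)) else t0
  let t2 := if PySem.Chars.startswith t1 ['.'] then PySem.List.slice t1 (some 1) none else t1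
  String.ofList (PySem.Chars.strip (pvALoop t2 [] false))

-- ===== PORT B =====
-- pass 1: convert a single char
def pvConv (c : Char) : Char := if PySem.Chars.isdigit c then Char.ofNat (1632 + (c.toNat - 48)) else c

-- '٠' <= s[i] <= '٩'
def pvIsArab (c : Char) : Bool := 1632 ≤ c.toNat && c.toNat ≤ 1641

-- pass 2 (B's while loop over indices, transcribed as recursion on the remaining chars):
-- emit the current char; right after an Arabic digit, skip the following run of dots
def pvBLoop : List Char → List Char
  | [] => []
  | c :: rest =>
    if pvIsArab c then c :: pvBLoop (rest.dropWhile (· == '.'))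
    else c :: pvBLoop rest
termination_by l => l.length
decreasing_by
  · exact Nat.lt_succ_of_le (List.length_dropWhile_le _ _)
  · simp

def convert_number_to_arabic_alt (text : String) : String :=
  let t0 := PySem.Chars.strip text.toList
  let t1 := if PySem.Chars.endswith t0 ['.'] then PySem.List.slice t0 none (some (-1)) else t0
  let t2 := if PySem.Chars.startswith t1 ['.'] then PySem.List.slice t1 (some 1) none else t1
  String.ofList (PySem.Chars.strip (pvBLoop (t2.map pvConv)))

-- ===== PRECONDITION & SPEC =====
def Spec_convert_number_to_arabic (text : String) (out : String) : Prop := out = convert_number_to_arabic_alt text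
instance (text : String) (out : String) : Decidable (Spec_convert_number_to_arabic text out) := by unfold Spec_convert_number_to_arabic; infer_instance

-- ===== CLAIM (what is proved, stated in full; the proofs are below) =====
def Claim_equal_convert_number_to_arabic : Prop := ∀ (text : String), Dom_convert_number_to_arabic text → Spec_convert_number_to_arabic text (convert_number_to_arabic text)

-- ===== LEMMAS AND PROOFS =====

lemma pvChar_toNat_ofNat (n : Nat) (h : n.isValidChar) : (Char.ofNat n).toNat = n := by
  simp only [Char.ofNat, dif_pos h]
  exact Char.toNat_ofNatAux h

lemma pvDigit_bounds (c : Char) (h : PySem.Chars.isdigit c = true) :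
    48 ≤ c.toNat ∧ c.toNat ≤ 57 := by
  simp only [PySem.Chars.isdigit, Bool.and_eq_true, decide_eq_true_eq, Char.le_def] at h
  exact ⟨h.1, h.2⟩

lemma pvDigit_not_dot (c : Char) (h : PySem.Chars.isdigit c = true) : (c == '.') = false := by
  have hb := pvDigit_bounds c h
  simp only [beq_eq_false_iff_ne, ne_eq]
  intro he
  have : c.toNat = 46 := by rw [he]; rfl
  omega

lemma pvConv_toNat_digit (c : Char) (h : PySem.Chars.isdigit c = true) :
    (pvConv c).toNat = 1632 + (c.toNat - 48) := by
  have hb := pvDigit_bounds c h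
  simp only [pvConv, h, if_true]
  exact pvChar_toNat_ofNat _ (Or.inl (by omega))

lemma pvConv_arab_digit (c : Char) (h : PySem.Chars.isdigit c = true) :
    pvIsArab (pvConv c) = true := by
  have hb := pvDigit_bounds c h
  have ht := pvConv_toNat_digit c h
  simp only [pvIsArab, Bool.and_eq_true, decide_eq_true_eq]
  omega

lemma pvConv_eq_self (c : Char) (h : PySem.Chars.isdigit c = false) : pvConv c = c := by
  simp [pvConv, h]

lemma pvConv_dot_iff (c : Char) : (pvConv c == '.') = (c == '.') := by
  by_cases h : PySem.Chars.isdigit c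
  · rw [pvDigit_not_dot c h]
    have ht := pvConv_toNat_digit c h
    have hb := pvDigit_bounds c h
    simp only [beq_eq_false_iff_ne, ne_eq]
    intro he
    have : (pvConv c).toNat = 46 := by rw [he]; rfl
    omega
  · rw [pvConv_eq_self c (by simpa using h)]

lemma pvConv_eq_arab (c : Char) (h : PySem.Chars.isdigit c = true) : pvConv c = pvArab c := by
  simp [pvConv, pvArab, h]

lemma pvDropDot_map (l : List Char) :
    (l.map pvConv).dropWhile (· == '.') = (l.dropWhile (· == '.')).map pvConv := by
  induction l with
  | nil => simp
  | cons c rest ih =>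
    by_cases hc : (c == '.') = true
    · have hcc : c = '.' := by simpa using hc
      subst hcc
      have hpd : pvConv '.' = '.' := rfl
      simp [hpd, ih]
    · simp only [List.map_cons, List.dropWhile_cons, pvConv_dot_iff, hc]
      simp

lemma mem_of_mem_strip (l : List Char) (c : Char) (h : c ∈ PySem.Chars.strip l) : c ∈ l := by
  simp only [PySem.Chars.strip, PySem.Chars.rstrip, PySem.Chars.lstrip, List.mem_reverse] at h
  have h1 := (List.dropWhile_sublist (p := PySem.Chars.isspace)
    (l := (List.dropWhile PySem.Chars.isspace l).reverse)).mem h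
  rw [List.mem_reverse] at h1
  exact (List.dropWhile_sublist _).mem h1

-- main loop equivalence: A's flag machine equals B's map-then-skip on ASCII input
lemma pvLoop_eq (l : List Char) (h : ∀ c ∈ l, c.toNat ≤ 126) :
    ∀ (acc : List Char) (b : Bool),
      pvALoop l acc b =
        acc ++ pvBLoop ((if b then l.dropWhile (· == '.') else l).map pvConv) := by
  induction l with
  | nil => intro acc b; cases b <;> simp [pvALoop, pvBLoop]
  | cons c rest ih =>
    intro acc b
    have hrest : ∀ x ∈ rest, x.toNat ≤ 126 := fun x hx => h x (List.mem_cons_of_mem _ hx)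
    have hc : c.toNat ≤ 126 := h c List.mem_cons_self
    by_cases hd : PySem.Chars.isdigit c
    · have hne := pvDigit_not_dot c hd
      have hlist : (if b then (c :: rest).dropWhile (· == '.') else (c :: rest)) = c :: rest := by
        cases b <;> simp [hne]
      rw [hlist]
      simp only [pvALoop, hd, if_true]
      rw [ih hrest (acc ++ [pvArab c]) true, List.map_cons, pvBLoop]
      rw [if_pos (pvConv_arab_digit c hd), pvDropDot_map, pvConv_eq_arab c hd]
      simp
    · have hd' : PySem.Chars.isdigit c = false := by simpa using hd
      by_cases hcd : c = '.'
      · cases b with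
        | true =>
          simp only [pvALoop, hd', Bool.false_eq_true, if_false]
          rw [if_pos (show c = '.' ∧ True from ⟨hcd, trivial⟩), if_pos trivial]
          rw [ih hrest acc true]
          simp [hcd]
        | false =>
          have hcond : ¬(c = '.' ∧ (false : Bool) = true) := by simp
          simp only [pvALoop, hd', Bool.false_eq_true, if_false]
          have hnac : pvIsArab c = false := by
            simp only [pvIsArab, Bool.and_eq_false_iff]
            left; simpa using by omega
          rw [ih hrest (acc ++ [c]) false, List.map_cons]
          simp [pvBLoop, pvConv_eq_self c hd', hnac]
      · have hcond : ¬(c = '.' ∧ b = true) := fun hx => hcd hx.1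
        have hlist : (if b then (c :: rest).dropWhile (· == '.') else (c :: rest)) = c :: rest := by
          cases b <;> simp [hcd]
        rw [hlist]
        simp only [pvALoop, hd', Bool.false_eq_true, if_false, if_neg hcond]
        have hnac : pvIsArab c = false := by
          simp only [pvIsArab, Bool.and_eq_false_iff]
          left; simpa using by omega
        rw [ih hrest (acc ++ [c]) false, List.map_cons]
        simp [pvBLoop, pvConv_eq_self c hd', hnac]

-- ===== VERDICT (by name: the statement is the Claim_ definition above) =====
theorem convert_number_to_arabic_spec : Claim_equal_convert_number_to_arabic := by
  have key : ∀ (t : List Char), (∀ c ∈ t, c.toNat ≤ 126) →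
      String.ofList (PySem.Chars.strip (pvALoop t [] false)) =
      String.ofList (PySem.Chars.strip (pvBLoop (t.map pvConv))) := by
    intro t ht
    rw [pvLoop_eq t ht [] false]
    simp
  have step : ∀ (l : List Char) (cond : Bool) (a b : Option Int),
      (∀ c ∈ l, c.toNat ≤ 126) →
      ∀ c ∈ (if cond then PySem.List.slice l a b else l), c.toNat ≤ 126 := by
    intro l cond a b hl c hcm
    split at hcm
    · exact hl c (PySem.List.mem_of_mem_slice _ _ _ hcm)
    · exact hl c hcm
  intro text hdom
  unfold Spec_convert_number_to_arabic convert_number_to_arabic convert_number_to_arabic_alt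
  have h0 : ∀ c ∈ text.toList, c.toNat ≤ 126 := by
    intro c hcm
    have hc := List.all_eq_true.mp hdom c hcm
    simp only [pvDomChar, Bool.or_eq_true, Bool.and_eq_true, decide_eq_true_eq, beq_iff_eq] at hc
    omega
  have h1 : ∀ c ∈ PySem.Chars.strip text.toList, c.toNat ≤ 126 :=
    fun c hc => h0 c (mem_of_mem_strip _ _ hc)
  exact key _ (step _ _ _ _ (step _ _ _ _ h1))
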